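-- pv_equiv track=rewrite | github.com/olaugh/mac-maven-analysis | leave_eval2.py | compute_unseen
-- ===== SOURCE A (Python) =====
-- from collections import Counter
--
-- def compute_unseen(bag_contents, rack=None, board_tiles=None):
--     """Compute unseen tile counts.
--
--     bag_contents: Counter of all tiles in game
--     rack: player's rack tiles (string) - these are known, not unseen
--     board_tiles: tiles on board (string) - also not unseen
--
--     Returns: Counter of unseen tiles
--     """
--     unseen = Counter(bag_contents)
--     if rack:
--         for t in rack.upper():
--             c = '?' if t == '?' else t.upper()
--             if unseen[c] > 0:
--                 unseen[c] -= 1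
--     if board_tiles:
--         for t in board_tiles.upper():
--             c = '?' if t == '?' else t.upper()
--             if unseen[c] > 0:
--                 unseen[c] -= 1
--     return unseen
-- ===== SOURCE B (Python) =====
-- from collections import Counter
--
-- def compute_unseen(bag_contents, rack=None, board_tiles=None):
--     """Aggregate rack+board into one Counter of seen tile types, then clamp
--     each bag count once per distinct type (instead of decrementing per tile)."""
--     seen = Counter()
--     for s in (rack, board_tiles):
--         if s:
--             for t in s.upper():
--                 seen['?' if t == '?' else t.upper()] += 1
--     unseen = Counter(bag_contents)
--     for c, n in seen.items():
--         if unseen[c] > 0: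
--             unseen[c] = max(unseen[c] - n, 0)
--     return unseen
-- ===== Notes on version B (the rewrite author's own statement) =====
-- stated objective: alternative
-- what changed: B aggregates the rack and board tiles into one 'seen' Counter and then does a single clamped subtraction max(count-n,0) per distinct tile type, instead of A's per-occurrence decrement loops; the 'unseen[c] > 0' guard reproduces A's treatment of absent and non-positive bag entries exactly.
import Mathlib
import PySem

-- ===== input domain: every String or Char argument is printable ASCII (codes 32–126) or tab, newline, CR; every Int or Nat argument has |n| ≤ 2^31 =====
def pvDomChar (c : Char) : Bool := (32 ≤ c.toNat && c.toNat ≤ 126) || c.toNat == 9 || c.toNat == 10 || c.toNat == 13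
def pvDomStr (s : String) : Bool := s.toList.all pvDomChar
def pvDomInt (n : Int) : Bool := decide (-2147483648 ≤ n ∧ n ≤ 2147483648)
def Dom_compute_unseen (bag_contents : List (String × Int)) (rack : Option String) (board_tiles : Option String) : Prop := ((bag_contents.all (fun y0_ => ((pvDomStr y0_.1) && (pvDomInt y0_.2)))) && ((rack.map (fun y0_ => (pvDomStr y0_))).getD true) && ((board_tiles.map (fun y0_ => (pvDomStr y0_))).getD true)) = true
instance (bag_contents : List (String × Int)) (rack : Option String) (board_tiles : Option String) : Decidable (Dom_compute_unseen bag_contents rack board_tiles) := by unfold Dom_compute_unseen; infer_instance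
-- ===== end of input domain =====

-- B aggregates the rack/board tiles into one seen-counter and clamps each bag count
-- once per distinct tile type, instead of A's per-occurrence decrement loops (alternative decomposition, same cost).

-- ===== PORT A =====
-- c = '?' if t == '?' else t.upper()
def pvNormA (t : Char) : String := if t == '?' then "?" else String.ofList (PySem.Chars.upper [t])

-- loop body: if unseen[c] > 0: unseen[c] -= 1   (Counter lookup of a missing key is 0, no insertion)
def pvStepA (u : PySem.Dict String Int) (t : Char) : PySem.Dict String Int :=
  let c := pvNormA t
  if 0 < u.getD c 0 then u.insert c (u.getD c 0 - 1) else u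

def compute_unseen (bag_contents : List (String × Int)) (rack : Option String) (board_tiles : Option String) : List (String × Int) :=
  let unseen := PySem.Dict.ofList bag_contents     -- unseen = Counter(bag_contents)
  let unseen := match rack with                    -- if rack: for t in rack.upper(): …
    | some r => if r ≠ "" then (PySem.Chars.upper r.toList).foldl pvStepA unseen else unseen
    | none => unseen
  let unseen := match board_tiles with             -- if board_tiles: for t in board_tiles.upper(): …
    | some b => if b ≠ "" then (PySem.Chars.upper b.toList).foldl pvStepA unseen else unseen
    | none => unseen
  unseen.items

-- ===== PORT B =====
def pvNormB (t : Char) : String := if t == '?' then "?" else String.ofList (PySem.Chars.upper [t])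

-- the characters one of (rack, board_tiles) contributes: 'if s: for t in s.upper(): …'
def pvSeenChars (s? : Option String) : List Char :=
  match s? with
  | some s => if s ≠ "" then PySem.Chars.upper s.toList else []
  | none => []

-- loop body: if unseen[c] > 0: unseen[c] = max(unseen[c] - n, 0)
def pvStepB (u : PySem.Dict String Int) (p : String × Int) : PySem.Dict String Int :=
  if 0 < u.getD p.1 0 then u.insert p.1 (max (u.getD p.1 0 - p.2) 0) else u

def compute_unseen_alt (bag_contents : List (String × Int)) (rack : Option String) (board_tiles : Option String) : List (String × Int) :=
  let seen : PySem.Dict String Int :=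
    (pvSeenChars rack ++ pvSeenChars board_tiles).foldl
      (fun d t => d.modify (pvNormB t) 0 (· + 1)) PySem.Dict.empty     -- seen[c] += 1
  let unseen := PySem.Dict.ofList bag_contents                          -- unseen = Counter(bag_contents)
  (seen.items.foldl pvStepB unseen).items                               -- for c, n in seen.items(): …

-- ===== PRECONDITION & SPEC =====
def Spec_compute_unseen (bag_contents : List (String × Int)) (rack : Option String) (board_tiles : Option String) (out : List (String × Int)) : Prop := out = compute_unseen_alt bag_contents rack board_tiles
instance (bag_contents : List (String × Int)) (rack : Option String) (board_tiles : Option String) (out : List (String × Int)) : Decidable (Spec_compute_unseen bag_contents rack board_tiles out) := by unfold Spec_compute_unseen; infer_instance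

-- ===== CLAIM (what is proved, stated in full; the proofs are below) =====
def Claim_equal_compute_unseen : Prop := ∀ (bag_contents : List (String × Int)) (rack : Option String) (board_tiles : Option String), Dom_compute_unseen bag_contents rack board_tiles → Spec_compute_unseen bag_contents rack board_tiles (compute_unseen bag_contents rack board_tiles)

-- ===== LEMMAS AND PROOFS =====

-- the normalized key list both programs consume
def pvKs (rack board_tiles : Option String) : List String :=
  (pvSeenChars rack ++ pvSeenChars board_tiles).map pvNormA

-- A's per-occurrence step, keyed by the normalized tile
def pvStepK (u : PySem.Dict String Int) (c : String) : PySem.Dict String Int :=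
  if 0 < u.getD c 0 then u.insert c (u.getD c 0 - 1) else u

-- the final count of a bag entry v after n seen occurrences of its tile
def pvAfter (v n : Int) : Int := if 0 < v then max (v - n) 0 else v

theorem pvAfter_zero (v : Int) : pvAfter v 0 = v := by
  unfold pvAfter; split <;> omega

theorem pvAfter_step (v : Int) (n : Int) (hn : 0 ≤ n) :
    pvAfter (if 0 < v then v - 1 else v) n = pvAfter v (n + 1) := by
  unfold pvAfter; split_ifs <;> omega

theorem pv_ite_keys_nodup (d : PySem.Dict String Int) (c : Prop) [Decidable c]
    (k : String) (w : Int) (hd : d.keys.Nodup) :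
    (if c then d.insert k w else d).keys.Nodup := by
  split
  · exact PySem.Dict.nodup_keys_insert d k w hd
  · exact hd

-- a guarded update of one key rewrites every item at that key by F,
-- provided F fixes non-positive values
theorem pv_step_items (d : PySem.Dict String Int) (k : String) (w : Int) (F : Int → Int)
    (hd : d.keys.Nodup)
    (hw : 0 < d.getD k 0 → w = F (d.getD k 0)) (hF : ∀ v, v ≤ 0 → F v = v) :
    (if 0 < d.getD k 0 then d.insert k w else d).items
      = d.items.map (fun p => if p.1 = k then (p.1, F p.2) else p) := by
  by_cases h : 0 < d.getD k 0
  · have hc : d.contains k = true := by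
      by_contra hc
      have := PySem.Dict.getD_of_not_contains d (0 : Int) (by simpa using hc)
      omega
    rw [if_pos h, PySem.Dict.items_insert_of_contains d w hc]
    refine List.map_congr_left ?_
    intro p hp
    by_cases hk : p.1 = k
    · rw [if_pos (by simp [hk] : (p.1 == k) = true), if_pos hk]
      have h2 : d.getD p.1 0 = p.2 := PySem.Dict.getD_of_mem_items d (by simpa using hp) hd 0
      rw [hk] at h2
      rw [hw h, h2, hk]
    · rw [if_neg (by simpa using hk), if_neg hk]
  · rw [if_neg h]
    have hid : ∀ p ∈ d.items, (if p.1 = k then (p.1, F p.2) else p) = p := by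
      intro p hp
      by_cases hk : p.1 = k
      · have h2 : d.getD p.1 0 = p.2 := PySem.Dict.getD_of_mem_items d (by simpa using hp) hd 0
        rw [hk] at h2
        rw [if_pos hk, hF _ (by omega)]
      · rw [if_neg hk]
    rw [List.map_congr_left hid]
    simp

-- A's per-occurrence loop over the normalized key list
theorem pv_foldA (ks : List String) : ∀ (d : PySem.Dict String Int), d.keys.Nodup →
    (ks.foldl pvStepK d).items
      = d.items.map (fun p => (p.1, pvAfter p.2 (ks.count p.1 : Int))) := by
  induction ks with
  | nil =>
    intro d _
    simp [pvAfter_zero]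
  | cons c cs ih =>
    intro d hd
    have hnd : (pvStepK d c).keys.Nodup := by
      unfold pvStepK; exact pv_ite_keys_nodup d _ _ _ hd
    have hstep : (pvStepK d c).items
        = d.items.map (fun p => if p.1 = c then (p.1, (fun v => if 0 < v then v - 1 else v) p.2) else p) :=
      pv_step_items d c (d.getD c 0 - 1) (fun v => if 0 < v then v - 1 else v) hd
        (fun h => by simp [h]) (fun v hv => by simp [not_lt.mpr hv])
    simp only [List.foldl_cons]
    rw [ih (pvStepK d c) hnd, hstep, List.map_map]
    refine List.map_congr_left ?_
    intro p _
    by_cases hk : p.1 = c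
    · simp only [Function.comp_apply, hk, List.count_cons_self]
      push_cast
      exact congrArg (Prod.mk c) (pvAfter_step p.2 _ (Int.natCast_nonneg _))
    · simp only [Function.comp_apply, if_neg hk, List.count_cons, beq_iff_eq]
      rw [if_neg (fun h => hk h.symm)]
      push_cast
      rw [add_zero]

-- B's per-distinct-type loop
theorem pv_foldB (n : String → Int) :
    ∀ (S : List String) (d : PySem.Dict String Int), S.Nodup → d.keys.Nodup →
    (S.foldl (fun u k => if 0 < u.getD k 0 then u.insert k (max (u.getD k 0 - n k) 0) else u) d).items
      = d.items.map (fun p => if p.1 ∈ S then (p.1, pvAfter p.2 (n p.1)) else p) := by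
  intro S
  induction S with
  | nil =>
    intro d _ _
    simp
  | cons k S ih =>
    intro d hS hd
    have hkS : k ∉ S := (List.nodup_cons.mp hS).1
    have hnd : (if 0 < d.getD k 0 then d.insert k (max (d.getD k 0 - n k) 0) else d).keys.Nodup :=
      pv_ite_keys_nodup d _ _ _ hd
    have hstep := pv_step_items d k (max (d.getD k 0 - n k) 0) (fun v => pvAfter v (n k)) hd
      (fun h => by simp [pvAfter, h]) (fun v hv => by simp [pvAfter, not_lt.mpr hv])
    simp only [List.foldl_cons]
    rw [ih _ (List.nodup_cons.mp hS).2 hnd, hstep, List.map_map]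
    refine List.map_congr_left ?_
    intro p _
    by_cases hk : p.1 = k
    · simp [Function.comp, hk, hkS]
    · by_cases hm : p.1 ∈ S <;> simp [Function.comp, hk, hm]

-- A's guarded two-loop structure is one fold over the concatenated seen characters
theorem pv_A_eq (bag : List (String × Int)) (rack board : Option String) :
    compute_unseen bag rack board
      = ((pvSeenChars rack ++ pvSeenChars board).foldl pvStepA (PySem.Dict.ofList bag)).items := by
  unfold compute_unseen pvSeenChars
  rw [List.foldl_append]
  cases rack <;> cases board <;> dsimp only
  · rfl
  · split_ifs <;> rfl
  · split_ifs <;> rfl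
  · split_ifs <;> rfl

theorem pv_A_items (bag : List (String × Int)) (rack board : Option String) :
    compute_unseen bag rack board
      = (PySem.Dict.ofList bag).items.map
          (fun p => (p.1, pvAfter p.2 (((pvKs rack board).count p.1 : Int)))) := by
  rw [pv_A_eq, ← pv_foldA (pvKs rack board) _ (PySem.Dict.nodup_keys_ofList bag)]
  unfold pvKs
  rw [List.foldl_map]
  rfl

theorem pv_B_items (bag : List (String × Int)) (rack board : Option String) :
    compute_unseen_alt bag rack board
      = (PySem.Dict.ofList bag).items.map
          (fun p => if p.1 ∈ PySem.Set.ofList (pvKs rack board)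
                    then (p.1, pvAfter p.2 (((pvKs rack board).count p.1 : Int))) else p) := by
  have hseen : (pvSeenChars rack ++ pvSeenChars board).foldl
      (fun d t => d.modify (pvNormB t) 0 (· + 1)) PySem.Dict.empty
      = PySem.Dict.counter (pvKs rack board) := by
    rw [PySem.Dict.counter_eq_foldl]
    unfold pvKs
    rw [List.foldl_map]
    rfl
  show ((((pvSeenChars rack ++ pvSeenChars board).foldl
      (fun d t => d.modify (pvNormB t) 0 (· + 1)) PySem.Dict.empty).items).foldl
      pvStepB (PySem.Dict.ofList bag)).items = _
  rw [hseen, PySem.Dict.items_counter, List.foldl_map]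
  exact pv_foldB (fun k => ((pvKs rack board).count k : Int))
    (PySem.Set.ofList (pvKs rack board)) (PySem.Dict.ofList bag)
    (PySem.Set.nodup_ofList _) (PySem.Dict.nodup_keys_ofList _)

-- ===== VERDICT (by name: the statement is the Claim_ definition above) =====
theorem compute_unseen_spec : Claim_equal_compute_unseen := by
  intro bag rack board _
  unfold Spec_compute_unseen
  rw [pv_A_items bag rack board, pv_B_items bag rack board]
  refine List.map_congr_left ?_
  intro p _
  by_cases hm : p.1 ∈ PySem.Set.ofList (pvKs rack board)
  · rw [if_pos hm]
  · have hnm : p.1 ∉ pvKs rack board := fun h => hm ((PySem.Set.mem_ofList _ _).mpr h)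
    rw [if_neg hm, List.count_eq_zero.mpr hnm]
    simp [pvAfter_zero]
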